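-- pv_equiv track=rewrite | github.com/jhchoi316/Python_Algorithm | Baekjoon/Algorithm_Study/1941.py | bfs
-- ===== SOURCE A (Python) =====
-- from collections import deque
--
-- def bfs(s):
--     l = [i for i in s]
--     dx = [-1, 1, 0, 0]
--     dy = [0, 0, 1, -1]
--
--     queue = deque([l[0]])
--     l.remove(l[0])
--
--     while queue:
--         x, y = queue.popleft()
--         for i in range(4):
--             nx = x + dx[i]
--             ny = y + dy[i]
--
--             if (nx, ny) in l:
--                 queue.append((nx, ny))
--                 l.remove((nx, ny))
--     if len(l) == 0:
--         return True
--
--     return False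
-- ===== SOURCE B (Python) =====
-- def _touch(visited, c):
--     x, y = c
--     return ((x - 1, y) in visited or (x + 1, y) in visited
--             or (x, y + 1) in visited or (x, y - 1) in visited)
--
--
-- def bfs(s):
--     # Saturation / frontier-growing connectivity check (no queue): repeatedly
--     # sweep the remaining cells and absorb every cell adjacent to the visited
--     # region, until a sweep absorbs nothing; connected iff nothing remains.
--     cells = []
--     seen = set()
--     for c in s:
--         if c not in seen:
--             seen.add(c)
--             cells.append(c)
--     if not cells:
--         return True
--     visited = cells[:1]
--     rest = cells[1:]
--     while True:
--         moved = [c for c in rest if _touch(visited, c)]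
--         if not moved:
--             return not rest
--         kept = [c for c in rest if not _touch(visited, c)]
--         visited += moved
--         rest = kept
-- ===== Notes on version B (the rewrite author's own statement) =====
-- stated objective: alternative
-- what changed: Replaces the BFS queue with a round-based frontier-saturation scan: each round partitions the remaining cells into those adjacent to the visited region (absorbed) and the rest, stopping when a round absorbs nothing; cells are deduplicated up front.
-- outside the precondition, e.g. on bfs([(0, 0), (0, 0)]): A returns False, B returns True; on bfs([(0, 0), (1, 0), (1, 0)]): A returns False, B returns True
import Mathlib
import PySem

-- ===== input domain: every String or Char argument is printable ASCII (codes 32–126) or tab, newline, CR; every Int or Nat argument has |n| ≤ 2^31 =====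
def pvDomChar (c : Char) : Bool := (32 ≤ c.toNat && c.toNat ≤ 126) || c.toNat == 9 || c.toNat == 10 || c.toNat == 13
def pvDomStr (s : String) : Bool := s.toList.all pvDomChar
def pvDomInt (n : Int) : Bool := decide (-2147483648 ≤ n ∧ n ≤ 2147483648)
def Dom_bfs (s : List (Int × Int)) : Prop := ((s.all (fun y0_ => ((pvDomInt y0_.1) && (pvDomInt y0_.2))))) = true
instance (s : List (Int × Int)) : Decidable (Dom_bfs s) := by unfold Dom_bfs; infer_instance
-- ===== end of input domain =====

-- B replaces A's BFS queue by round-based frontier saturation (repeated partition of the remaining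
-- cells into absorbed/kept); same result on nonempty duplicate-free inputs (Pre_), B returns True
-- where A raises on the empty list.

-- ===== PORT A =====
-- the four (dx, dy) direction pairs of A, zipped: dx = [-1,1,0,0], dy = [0,0,1,-1]
def pvDirs : List (Int × Int) := [(-1, 0), (1, 0), (0, 1), (0, -1)]

-- one iteration of A's inner 'for i in range(4)' body: state = (queue, l)
def pvStepA (x y : Int) (st : List (Int × Int) × List (Int × Int)) (d : Int × Int) :
    List (Int × Int) × List (Int × Int) :=
  let n := (x + d.1, y + d.2)
  if n ∈ st.2 then (st.1 ++ [n], st.2.erase n) else st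

-- termination helper for pvLoopA: one inner step preserves |queue| + |l|
theorem pvStepA_sum (x y : Int) (st : List (Int × Int) × List (Int × Int)) (d : Int × Int) :
    (pvStepA x y st d).1.length + (pvStepA x y st d).2.length = st.1.length + st.2.length := by
  unfold pvStepA
  dsimp only
  split
  · next h =>
    simp [List.length_erase_of_mem h]
    have : st.2.length ≠ 0 := by
      intro h0
      rw [List.length_eq_zero_iff] at h0
      simp [h0] at h
    omega
  · rfl

-- termination helper for pvLoopA: the inner fold preserves |queue| + |l|
theorem pvFoldA_sum (x y : Int) (ds : List (Int × Int)) :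
    ∀ st : List (Int × Int) × List (Int × Int),
      (ds.foldl (pvStepA x y) st).1.length + (ds.foldl (pvStepA x y) st).2.length =
        st.1.length + st.2.length := by
  induction ds with
  | nil => intro st; rfl
  | cons d ds ih => intro st; simp only [List.foldl_cons]; rw [ih, pvStepA_sum]

-- A's 'while queue:' loop; returns the final l
def pvLoopA (q l : List (Int × Int)) : List (Int × Int) :=
  match q with
  | [] => l
  | (x, y) :: q' =>
    let st := pvDirs.foldl (pvStepA x y) (q', l)
    pvLoopA st.1 st.2
termination_by q.length + l.length
decreasing_by
  have h := pvFoldA_sum x y pvDirs (q', l)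
  simp only [List.length_cons] at *
  omega

def bfs (s : List (Int × Int)) : Bool :=
  match s with
  | [] => false  -- unreachable under Pre_: Python raises IndexError on l[0] here
  | c :: rest => decide ((pvLoopA [c] rest).length = 0)

-- ===== PORT B =====
-- B's _touch helper: is some grid neighbour of c in visited?
def pvTouch (visited : List (Int × Int)) (c : Int × Int) : Bool :=
  decide ((c.1 - 1, c.2) ∈ visited) || decide ((c.1 + 1, c.2) ∈ visited) ||
    decide ((c.1, c.2 + 1) ∈ visited) || decide ((c.1, c.2 - 1) ∈ visited)

-- B's 'while True:' saturation loop; returns the final rest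
def pvLoopB (visited rest : List (Int × Int)) : List (Int × Int) :=
  if (rest.filter (pvTouch visited)).isEmpty then rest
  else
    pvLoopB (visited ++ rest.filter (pvTouch visited)) (rest.filter (fun c => !pvTouch visited c))
termination_by rest.length
decreasing_by
  rename_i h
  simp only [List.isEmpty_iff, List.unattach_filter, List.unattach_attach] at h ⊢
  have ⟨a, ha, hta⟩ : ∃ a ∈ rest, pvTouch visited a = true := by
    obtain ⟨a, ha⟩ := List.exists_mem_of_ne_nil _ h
    exact ⟨a, (List.mem_filter.mp ha).1, (List.mem_filter.mp ha).2⟩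
  exact List.length_filter_lt_length_iff_exists.mpr ⟨a, ha, by simp [hta]⟩

def bfs_alt (s : List (Int × Int)) : Bool :=
  let cells := PySem.Set.ofList s
  match cells with
  | [] => true
  | c :: rest => decide ((pvLoopB [c] rest).length = 0)

-- ===== PRECONDITION & SPEC =====
-- Pre_ excludes the empty list, on which A raises IndexError, and lists with duplicate cells, on
-- which A's remove-one-copy bookkeeping makes the answer depend accidentally on multiplicities
-- (a duplicated cell is a second list entry, never a grid neighbour of itself).
def Pre_bfs (s : List (Int × Int)) : Prop := s ≠ [] ∧ s.Nodup
instance (s : List (Int × Int)) : Decidable (Pre_bfs s) := by unfold Pre_bfs; infer_instance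

def pvWitness_bfs : (List (Int × Int)) := [(0, 0), (0, 1), (1, 1)]

def Spec_bfs (s : List (Int × Int)) (out : Bool) : Prop := out = bfs_alt s
instance (s : List (Int × Int)) (out : Bool) : Decidable (Spec_bfs s out) := by unfold Spec_bfs; infer_instance

-- ===== CLAIM (what is proved, stated in full; the proofs are below) =====
def Claim_equal_bfs : Prop := ∀ (s : List (Int × Int)), Dom_bfs s → Pre_bfs s → Spec_bfs s (bfs s)

-- ===== LEMMAS AND PROOFS =====

-- the grid-adjacency relation underlying both programs
def pvAdj (a b : Int × Int) : Prop := ∃ d ∈ pvDirs, b = (a.1 + d.1, a.2 + d.2)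

-- reachability from x within the ambient list m (every step lands in m)
def pvReach (m : List (Int × Int)) (x c : Int × Int) : Prop :=
  Relation.ReflTransGen (fun a b => pvAdj a b ∧ b ∈ m) x c

-- shrinking the ambient list: a path in m either stays in m' (= m minus N) or has a last
-- N-vertex from which the remaining path stays in m'
theorem pvReach_drop {m m' N : List (Int × Int)}
    (hm : ∀ b, b ∈ m' ↔ (b ∈ m ∧ b ∉ N)) {x c : Int × Int}
    (h : pvReach m x c) :
    pvReach m' x c ∨ ∃ n ∈ N, pvReach m' n c := by
  induction h using Relation.ReflTransGen.head_induction_on with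
  | refl => exact Or.inl Relation.ReflTransGen.refl
  | @head u v hstep _ ih =>
    rcases ih with ih | ih
    · by_cases hv : v ∈ N
      · exact Or.inr ⟨v, hv, ih⟩
      · exact Or.inl (Relation.ReflTransGen.head ⟨hstep.1, (hm v).mpr ⟨hstep.2, hv⟩⟩ ih)
    · exact Or.inr ih

-- ---------- A side ----------

-- full invariant of A's inner fold over the four directions
theorem pvFoldA_spec (x y : Int) (ds : List (Int × Int)) :
    ∀ (q0 l0 : List (Int × Int)), l0.Nodup →
      (ds.foldl (pvStepA x y) (q0, l0)).2.Nodup ∧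
      (∀ b, b ∈ (ds.foldl (pvStepA x y) (q0, l0)).2 → b ∈ l0) ∧
      (∀ b, b ∈ q0 → b ∈ (ds.foldl (pvStepA x y) (q0, l0)).1) ∧
      (∀ b, b ∈ (ds.foldl (pvStepA x y) (q0, l0)).1 →
        b ∈ q0 ∨ (b ∈ l0 ∧ ∃ d ∈ ds, b = (x + d.1, y + d.2))) ∧
      (∀ b, b ∈ l0 → b ∉ (ds.foldl (pvStepA x y) (q0, l0)).2 →
        b ∈ (ds.foldl (pvStepA x y) (q0, l0)).1) ∧
      (∀ b, b ∈ l0 → (∃ d ∈ ds, b = (x + d.1, y + d.2)) →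
        b ∉ (ds.foldl (pvStepA x y) (q0, l0)).2) := by
  induction ds with
  | nil =>
    intro q0 l0 h
    refine ⟨h, fun b hb => hb, fun b hb => hb, fun b hb => Or.inl hb,
      fun b hb hnb => absurd hb hnb, ?_⟩
    rintro b hb ⟨d, hd, -⟩
    simp at hd
  | cons d ds ih =>
    intro q0 l0 hnd
    simp only [List.foldl_cons]
    by_cases hm : (x + d.1, y + d.2) ∈ l0
    · have hstep : pvStepA x y (q0, l0) d
          = (q0 ++ [(x + d.1, y + d.2)], l0.erase (x + d.1, y + d.2)) := by
        simp [pvStepA, hm]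
      rw [hstep]
      obtain ⟨ihnd, ihsub, ihq, ihorig, ihrem, ihnbr⟩ :=
        ih (q0 ++ [(x + d.1, y + d.2)]) (l0.erase (x + d.1, y + d.2)) (hnd.erase _)
      refine ⟨ihnd, ?_, ?_, ?_, ?_, ?_⟩
      · exact fun b hb => List.mem_of_mem_erase (ihsub b hb)
      · exact fun b hb => ihq b (List.mem_append_left _ hb)
      · intro b hb
        rcases ihorig b hb with hq | ⟨hbl, d', hd', rfl⟩
        · rcases List.mem_append.mp hq with h | h
          · exact Or.inl h
          · have hbn : b = (x + d.1, y + d.2) := List.mem_singleton.mp h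
            exact Or.inr ⟨hbn ▸ hm, d, List.mem_cons_self .., hbn⟩
        · exact Or.inr ⟨List.mem_of_mem_erase hbl, d', List.mem_cons_of_mem _ hd', rfl⟩
      · intro b hbl hbn
        by_cases hbe : b ∈ l0.erase (x + d.1, y + d.2)
        · exact ihrem b hbe hbn
        · have hbeq : b = (x + d.1, y + d.2) := by
            by_contra hne
            exact hbe ((hnd.mem_erase_iff).mpr ⟨hne, hbl⟩)
          exact ihq b (List.mem_append_right _ (by simp [hbeq]))
      · rintro b hbl ⟨d', hd', hb⟩
        rcases List.mem_cons.mp hd' with rfl | hd'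
        · intro hbF
          have hbe := ihsub b hbF
          rw [hb] at hbe
          exact absurd ((hnd.mem_erase_iff).mp hbe).1 (by simp)
        · by_cases hbe : b ∈ l0.erase (x + d.1, y + d.2)
          · exact ihnbr b hbe ⟨d', hd', hb⟩
          · intro hbF
            exact hbe (ihsub b hbF)
    · have hstep : pvStepA x y (q0, l0) d = (q0, l0) := by simp [pvStepA, hm]
      rw [hstep]
      obtain ⟨ihnd, ihsub, ihq, ihorig, ihrem, ihnbr⟩ := ih q0 l0 hnd
      refine ⟨ihnd, ihsub, ihq, ?_, ihrem, ?_⟩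
      · intro b hb
        rcases ihorig b hb with h | ⟨hbl, d', hd', rfl⟩
        · exact Or.inl h
        · exact Or.inr ⟨hbl, d', List.mem_cons_of_mem _ hd', rfl⟩
      · rintro b hbl ⟨d', hd', rfl⟩
        rcases List.mem_cons.mp hd' with rfl | hd'
        · exact absurd hbl hm
        · exact ihnbr _ hbl ⟨d', hd', rfl⟩

-- pvLoopA only erases: the final l is contained in the initial one
theorem pvLoopA_subset :
    ∀ (q l : List (Int × Int)), l.Nodup → ∀ b, b ∈ pvLoopA q l → b ∈ l := by
  intro q l
  induction q, l using pvLoopA.induct with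
  | case1 l =>
    intro _ b hb
    simpa [pvLoopA] using hb
  | case2 l x y q' st ih =>
    intro hnd b hb
    obtain ⟨ihnd, ihsub, -⟩ := pvFoldA_spec x y pvDirs q' l hnd
    rw [pvLoopA] at hb
    exact ihsub b (ih ihnd b hb)

-- soundness: every cell A removes is reachable (ambient s) from the start
theorem pvLoopA_sound (s : List (Int × Int)) (c0 : Int × Int) :
    ∀ (q l : List (Int × Int)), l.Nodup →
      (∀ v ∈ q, pvReach s c0 v) → (∀ b ∈ l, b ∈ s) →
      ∀ b ∈ l, b ∉ pvLoopA q l → pvReach s c0 b := by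
  intro q l
  induction q, l using pvLoopA.induct with
  | case1 l =>
    intro _ _ _ b hb hnb
    rw [pvLoopA] at hnb
    exact absurd hb hnb
  | case2 l x y q' st ih =>
    intro hnd hq hls b hbl hnb
    obtain ⟨ihnd, ihsub, ihqm, ihorig, ihrem, ihnbr⟩ := pvFoldA_spec x y pvDirs q' l hnd
    rw [pvLoopA] at hnb
    have hq' : ∀ v ∈ (pvDirs.foldl (pvStepA x y) (q', l)).1, pvReach s c0 v := by
      intro v hv
      rcases ihorig v hv with h | ⟨hvl, hd⟩
      · exact hq v (List.mem_cons_of_mem _ h)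
      · exact Relation.ReflTransGen.tail (hq (x, y) (List.mem_cons_self ..)) ⟨hd, hls v hvl⟩
    by_cases hbF : b ∈ (pvDirs.foldl (pvStepA x y) (q', l)).2
    · exact ih ihnd hq' (fun b' hb' => hls b' (ihsub b' hb')) b hbF hnb
    · exact hq' b (ihrem b hbl hbF)

-- completeness: no surviving cell is reachable from the queue within l
theorem pvLoopA_complete :
    ∀ (q l : List (Int × Int)), l.Nodup → (∀ v ∈ q, v ∉ l) →
      ∀ b ∈ pvLoopA q l, ∀ v ∈ q, ¬ pvReach l v b := by
  intro q l
  induction q, l using pvLoopA.induct with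
  | case1 l =>
    intro _ _ b _ v hv
    simp at hv
  | case2 l x y q' st ih =>
    intro hnd hdisj b hb v hv hreach
    obtain ⟨ihnd, ihsub, ihqm, ihorig, ihrem, ihnbr⟩ := pvFoldA_spec x y pvDirs q' l hnd
    rw [pvLoopA] at hb
    have hNmem : ∀ a, a ∈ (pvDirs.map (fun d => ((x + d.1, y + d.2) : Int × Int))).filter
        (fun a => decide (a ∈ l)) ↔ (a ∈ l ∧ pvAdj (x, y) a) := by
      intro a
      simp only [List.mem_filter, List.mem_map, decide_eq_true_eq, pvAdj]
      constructor
      · rintro ⟨⟨d, hd, rfl⟩, hal⟩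
        exact ⟨hal, d, hd, rfl⟩
      · rintro ⟨hal, d, hd, rfl⟩
        exact ⟨⟨d, hd, rfl⟩, hal⟩
    have hmem : ∀ a, a ∈ (pvDirs.foldl (pvStepA x y) (q', l)).2 ↔
        (a ∈ l ∧ a ∉ (pvDirs.map (fun d => ((x + d.1, y + d.2) : Int × Int))).filter
          (fun a => decide (a ∈ l))) := by
      intro a
      constructor
      · intro ha
        refine ⟨ihsub a ha, ?_⟩
        intro haN
        obtain ⟨hal, hadj⟩ := (hNmem a).mp haN
        exact ihnbr a hal hadj ha
      · rintro ⟨hal, haN⟩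
        by_contra hna
        rcases ihorig a (ihrem a hal hna) with h | ⟨-, hadj⟩
        · exact hdisj a (List.mem_cons_of_mem _ h) hal
        · exact haN ((hNmem a).mpr ⟨hal, hadj⟩)
    have hNq : ∀ n ∈ (pvDirs.map (fun d => ((x + d.1, y + d.2) : Int × Int))).filter
        (fun a => decide (a ∈ l)), n ∈ (pvDirs.foldl (pvStepA x y) (q', l)).1 := by
      intro n hn
      obtain ⟨hnl, hadj⟩ := (hNmem n).mp hn
      exact ihrem n hnl (ihnbr n hnl hadj)
    have hdisj' : ∀ w ∈ (pvDirs.foldl (pvStepA x y) (q', l)).1,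
        w ∉ (pvDirs.foldl (pvStepA x y) (q', l)).2 := by
      intro w hw hwF
      rcases ihorig w hw with h | ⟨hwl, hadj⟩
      · exact hdisj w (List.mem_cons_of_mem _ h) (ihsub w hwF)
      · exact ihnbr w hwl hadj hwF
    have IH := ih ihnd hdisj' b hb
    rcases List.mem_cons.mp hv with rfl | hv'
    · rcases hreach.cases_head with heq | ⟨w, ⟨hadj, hwl⟩, hrest⟩
      · refine hdisj (x, y) hv ?_
        rw [heq]
        exact ihsub b (pvLoopA_subset _ _ ihnd b hb)
      · have hwN := (hNmem w).mpr ⟨hwl, hadj⟩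
        rcases pvReach_drop hmem hrest with hr | ⟨n, hnN, hr⟩
        · exact IH w (hNq w hwN) hr
        · exact IH n (hNq n hnN) hr
    · rcases pvReach_drop hmem hreach with hr | ⟨n, hnN, hr⟩
      · exact IH v (ihqm v hv') hr
      · exact IH n (hNq n hnN) hr

-- ---------- B side ----------

theorem pvTouch_iff (visited : List (Int × Int)) (c : Int × Int) :
    pvTouch visited c = true ↔ ∃ w ∈ visited, pvAdj w c := by
  constructor
  · intro h
    simp only [pvTouch, Bool.or_eq_true, decide_eq_true_eq] at h
    rcases h with ((h | h) | h) | h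
    · refine ⟨(c.1 - 1, c.2), h, ⟨(1, 0), by norm_num [pvDirs], ?_⟩⟩
      obtain ⟨a, b⟩ := c
      simp
    · refine ⟨(c.1 + 1, c.2), h, ⟨(-1, 0), by norm_num [pvDirs], ?_⟩⟩
      obtain ⟨a, b⟩ := c
      simp
    · refine ⟨(c.1, c.2 + 1), h, ⟨(0, -1), by norm_num [pvDirs], ?_⟩⟩
      obtain ⟨a, b⟩ := c
      simp
    · refine ⟨(c.1, c.2 - 1), h, ⟨(0, 1), by norm_num [pvDirs], ?_⟩⟩
      obtain ⟨a, b⟩ := c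
      simp
  · rintro ⟨w, hw, d, hd, rfl⟩
    obtain ⟨a, b⟩ := w
    fin_cases hd <;> simp only [pvTouch, Bool.or_eq_true, decide_eq_true_eq] <;> norm_num <;> tauto

-- unfolding lemma for pvLoopB without the attach encoding
theorem pvLoopB_eq (visited rest : List (Int × Int)) :
    pvLoopB visited rest =
      if (rest.filter (pvTouch visited)).isEmpty then rest
      else pvLoopB (visited ++ rest.filter (pvTouch visited))
        (rest.filter (fun c => !pvTouch visited c)) := by
  rw [pvLoopB]

theorem pvLoopB_subset :
    ∀ (visited rest : List (Int × Int)), ∀ b, b ∈ pvLoopB visited rest → b ∈ rest := by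
  intro visited rest
  induction visited, rest using pvLoopB.induct with
  | case1 visited rest h =>
    intro b hb
    simp only [List.unattach_filter, List.unattach_attach] at h
    rwa [pvLoopB_eq, if_pos h] at hb
  | case2 visited rest h ih =>
    intro b hb
    simp only [List.unattach_filter, List.unattach_attach] at h ih
    rw [pvLoopB_eq, if_neg h] at hb
    exact (List.mem_filter.mp (ih b hb)).1

theorem pvLoopB_sound (s : List (Int × Int)) (c0 : Int × Int) :
    ∀ (visited rest : List (Int × Int)),
      (∀ v ∈ visited, pvReach s c0 v) → (∀ b ∈ rest, b ∈ s) →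
      ∀ b ∈ rest, b ∉ pvLoopB visited rest → pvReach s c0 b := by
  intro visited rest
  induction visited, rest using pvLoopB.induct with
  | case1 visited rest h =>
    intro _ _ b hb hnb
    simp only [List.unattach_filter, List.unattach_attach] at h
    rw [pvLoopB_eq, if_pos h] at hnb
    exact absurd hb hnb
  | case2 visited rest h ih =>
    intro hv hr b hb hnb
    simp only [List.unattach_filter, List.unattach_attach] at h ih
    rw [pvLoopB_eq, if_neg h] at hnb
    have hv' : ∀ w ∈ visited ++ rest.filter (pvTouch visited), pvReach s c0 w := by
      intro w hw
      rcases List.mem_append.mp hw with h1 | h1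
      · exact hv w h1
      · obtain ⟨hwr, ht⟩ := List.mem_filter.mp h1
        obtain ⟨u, hu, hadj⟩ := (pvTouch_iff visited w).mp ht
        exact Relation.ReflTransGen.tail (hv u hu) ⟨hadj, hr w hwr⟩
    by_cases hbk : b ∈ rest.filter (fun c => !pvTouch visited c)
    · exact ih hv' (fun b' hb' => hr b' (List.mem_filter.mp hb').1) b hbk hnb
    · have ht : pvTouch visited b = true := by
        by_contra hf
        exact hbk (List.mem_filter.mpr ⟨hb, by simp [Bool.not_eq_true] at hf ⊢; exact hf⟩)
      exact hv' b (List.mem_append_right _ (List.mem_filter.mpr ⟨hb, ht⟩))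

theorem pvLoopB_complete :
    ∀ (visited rest : List (Int × Int)), (∀ v ∈ visited, v ∉ rest) →
      ∀ b ∈ pvLoopB visited rest, ∀ v ∈ visited, ¬ pvReach rest v b := by
  intro visited rest
  induction visited, rest using pvLoopB.induct with
  | case1 visited rest h =>
    intro hdisj b hb v hv hreach
    simp only [List.unattach_filter, List.unattach_attach] at h
    rw [pvLoopB_eq, if_pos h] at hb
    rcases hreach.cases_head with heq | ⟨w, ⟨hadj, hwr⟩, -⟩
    · exact hdisj v hv (heq ▸ hb)
    · have htw : pvTouch visited w = true := (pvTouch_iff visited w).mpr ⟨v, hv, hadj⟩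
      have : w ∈ rest.filter (pvTouch visited) := List.mem_filter.mpr ⟨hwr, htw⟩
      rw [List.isEmpty_iff] at h
      simp [h] at this
  | case2 visited rest h ih =>
    intro hdisj b hb v hv hreach
    simp only [List.unattach_filter, List.unattach_attach] at h ih
    rw [pvLoopB_eq, if_neg h] at hb
    have hmem : ∀ a, a ∈ rest.filter (fun c => !pvTouch visited c) ↔
        (a ∈ rest ∧ a ∉ rest.filter (pvTouch visited)) := by
      intro a
      simp only [List.mem_filter, Bool.not_eq_eq_eq_not, Bool.not_true]
      constructor
      · rintro ⟨h1, h2⟩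
        exact ⟨h1, fun hc => by simp [h2] at hc⟩
      · rintro ⟨h1, h2⟩
        refine ⟨h1, ?_⟩
        by_contra hc
        simp only [Bool.not_eq_false] at hc
        exact h2 ⟨h1, hc⟩
    have hdisj' : ∀ w ∈ visited ++ rest.filter (pvTouch visited),
        w ∉ rest.filter (fun c => !pvTouch visited c) := by
      intro w hw hwk
      rcases List.mem_append.mp hw with h1 | h1
      · exact hdisj w h1 (List.mem_filter.mp hwk).1
      · have h2 := (List.mem_filter.mp h1).2
        have h3 := (List.mem_filter.mp hwk).2
        simp [h2] at h3
    have IH := ih hdisj' b hb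
    rcases pvReach_drop hmem hreach with hr | ⟨n, hn, hr⟩
    · exact IH v (List.mem_append_left _ hv) hr
    · exact IH n (List.mem_append_right _ hn) hr

-- ---------- top level ----------

-- A decides: every tail cell is reachable from the head within the whole cell list
theorem pvA_char (c0 : Int × Int) (tail : List (Int × Int)) (hnd : (c0 :: tail).Nodup) :
    (pvLoopA [c0] tail = [] ↔ ∀ b ∈ tail, pvReach (c0 :: tail) c0 b) := by
  rw [List.nodup_cons] at hnd
  obtain ⟨hc0, hndt⟩ := hnd
  constructor
  · intro he b hb
    refine pvLoopA_sound (c0 :: tail) c0 [c0] tail hndt ?_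
      (fun b' hb' => List.mem_cons_of_mem _ hb') b hb (by simp [he])
    intro v hv
    rw [List.mem_singleton.mp hv]
    exact Relation.ReflTransGen.refl
  · intro hall
    rw [List.eq_nil_iff_forall_not_mem]
    intro b hb
    have hbt : b ∈ tail := pvLoopA_subset [c0] tail hndt b hb
    have hmem : ∀ a, a ∈ tail ↔ (a ∈ (c0 :: tail) ∧ a ∉ [c0]) := by
      intro a
      simp only [List.mem_cons, List.not_mem_nil, or_false]
      constructor
      · intro h
        exact ⟨Or.inr h, fun heq => hc0 (heq ▸ h)⟩
      · rintro ⟨h | h, hne⟩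
        · exact absurd h hne
        · exact h
    have hrt : pvReach tail c0 b := by
      rcases pvReach_drop hmem (hall b hbt) with h | ⟨n, hn, h⟩
      · exact h
      · rw [List.mem_singleton.mp hn] at h
        exact h
    exact pvLoopA_complete [c0] tail hndt
      (fun v hv => (List.mem_singleton.mp hv) ▸ hc0) b hb c0 (List.mem_singleton.mpr rfl) hrt

-- B decides the same proposition
theorem pvB_char (c0 : Int × Int) (tail : List (Int × Int)) (hnd : (c0 :: tail).Nodup) :
    (pvLoopB [c0] tail = [] ↔ ∀ b ∈ tail, pvReach (c0 :: tail) c0 b) := by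
  rw [List.nodup_cons] at hnd
  obtain ⟨hc0, hndt⟩ := hnd
  constructor
  · intro he b hb
    refine pvLoopB_sound (c0 :: tail) c0 [c0] tail ?_
      (fun b' hb' => List.mem_cons_of_mem _ hb') b hb (by simp [he])
    intro v hv
    rw [List.mem_singleton.mp hv]
    exact Relation.ReflTransGen.refl
  · intro hall
    rw [List.eq_nil_iff_forall_not_mem]
    intro b hb
    have hbt : b ∈ tail := pvLoopB_subset [c0] tail b hb
    have hmem : ∀ a, a ∈ tail ↔ (a ∈ (c0 :: tail) ∧ a ∉ [c0]) := by
      intro a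
      simp only [List.mem_cons, List.not_mem_nil, or_false]
      constructor
      · intro h
        exact ⟨Or.inr h, fun heq => hc0 (heq ▸ h)⟩
      · rintro ⟨h | h, hne⟩
        · exact absurd h hne
        · exact h
    have hrt : pvReach tail c0 b := by
      rcases pvReach_drop hmem (hall b hbt) with h | ⟨n, hn, h⟩
      · exact h
      · rw [List.mem_singleton.mp hn] at h
        exact h
    exact pvLoopB_complete [c0] tail
      (fun v hv => (List.mem_singleton.mp hv) ▸ hc0) b hb c0 (List.mem_singleton.mpr rfl) hrt

-- ===== VERDICT (by name: the statement is the Claim_ definition above) =====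
theorem bfs_spec : Claim_equal_bfs := by
  intro s _ hpre
  obtain ⟨hne, hnd⟩ := hpre
  unfold Spec_bfs bfs bfs_alt
  match s, hne with
  | c0 :: tail, _ =>
    simp only [PySem.Set.ofList_eq_self_of_nodup _ hnd]
    have hA := pvA_char c0 tail hnd
    have hB := pvB_char c0 tail hnd
    rw [Bool.eq_iff_iff]
    simp only [decide_eq_true_iff, List.length_eq_zero_iff]
    rw [hA, hB]
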